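-- pv_equiv track=rewrite | github.com/EmanOthman21/PDP-11 | Assembler/OperationHandler.py | IsRegister
-- ===== SOURCE A (Python) =====
-- def IsRegister(name):
--   '''
--   Input: operand name
--   Output: Flag indicating if the operand is register
--   '''
--   registers = ["R0","R1","R2","R3","R4","R5","R6","R7"]
--   flag = False
--   for register in registers:
--     if register in name:
--       flag = True
--       break
--   return flag
-- ===== SOURCE B (Python) =====
-- def IsRegister(name):
--   '''
--   Input: operand name
--   Output: Flag indicating if the operand is register
--   '''
--   for i in range(len(name) - 1):
--     if name[i] == 'R' and name[i + 1] in "01234567":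
--       return True
--   return False
-- ===== Notes on version B (the rewrite author's own statement) =====
-- stated objective: idiomatic
-- what changed: Instead of eight independent substring searches over the register-name list, B makes a single left-to-right pass over name, testing at each position whether each character equals the letter R with the following character being a digit between 0 and 7.
import Mathlib
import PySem

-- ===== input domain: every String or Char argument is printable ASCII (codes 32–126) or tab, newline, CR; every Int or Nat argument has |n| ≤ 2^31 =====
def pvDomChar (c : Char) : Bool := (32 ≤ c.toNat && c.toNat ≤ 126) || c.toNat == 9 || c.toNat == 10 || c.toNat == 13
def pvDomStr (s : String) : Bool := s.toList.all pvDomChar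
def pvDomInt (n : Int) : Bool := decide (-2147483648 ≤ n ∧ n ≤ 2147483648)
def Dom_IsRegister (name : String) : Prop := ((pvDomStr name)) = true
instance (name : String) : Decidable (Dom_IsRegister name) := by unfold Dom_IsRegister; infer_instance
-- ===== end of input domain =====

-- B replaces A's eight independent substring searches by one left-to-right window scan for the letter R followed by a digit between 0 and 7 (objective: idiomatic single pass).

-- ===== PORT A =====
-- A: loop over the eight register names, set flag and break on the first substring hit.
def pvLoopA : List String → String → Bool → Bool
  | [], _, flag => flag
  | r :: rs, name, flag =>
    if PySem.Str.isIn r name then true else pvLoopA rs name flag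

def IsRegister (name : String) : Bool :=
  pvLoopA ["R0", "R1", "R2", "R3", "R4", "R5", "R6", "R7"] name false

-- ===== PORT B =====
-- B: one pass over the characters; at each position test name[i] == 'R' and name[i+1] ∈ "01234567".
def pvScanB : List Char → Bool
  | c :: d :: rest =>
    if c == 'R' && ['0', '1', '2', '3', '4', '5', '6', '7'].contains d then true
    else pvScanB (d :: rest)
  | _ => false

def IsRegister_alt (name : String) : Bool := pvScanB name.toList

-- ===== PRECONDITION & SPEC =====
def Spec_IsRegister (name : String) (out : Bool) : Prop := out = IsRegister_alt name
instance (name : String) (out : Bool) : Decidable (Spec_IsRegister name out) := by unfold Spec_IsRegister; infer_instance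

-- ===== CLAIM (what is proved, stated in full; the proofs are below) =====
def Claim_equal_IsRegister : Prop := ∀ (name : String), Dom_IsRegister name → Spec_IsRegister name (IsRegister name)

-- ===== LEMMAS AND PROOFS =====

-- a two-character window scan for the fixed pair [a, b]
def pvPair (a b : Char) : List Char → Bool
  | c :: d :: rest => (c == a && d == b) || pvPair a b (d :: rest)
  | _ => false

theorem pvPair_iff_infix (a b : Char) (cs : List Char) :
    pvPair a b cs = true ↔ [a, b] <:+: cs := by
  induction cs with
  | nil => simp [pvPair]
  | cons c cs ih =>
    cases cs with
    | nil =>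
      simp only [pvPair, Bool.false_eq_true, false_iff]
      intro h
      simpa using h.length_le
    | cons d rest =>
      simp only [pvPair, Bool.or_eq_true, Bool.and_eq_true, beq_iff_eq, ih,
        List.infix_cons_iff, List.cons_prefix_cons]
      simp [eq_comm]

theorem pvScanB_iff (cs : List Char) :
    pvScanB cs = true ↔
      pvPair 'R' '0' cs = true ∨ pvPair 'R' '1' cs = true ∨ pvPair 'R' '2' cs = true ∨
      pvPair 'R' '3' cs = true ∨ pvPair 'R' '4' cs = true ∨ pvPair 'R' '5' cs = true ∨
      pvPair 'R' '6' cs = true ∨ pvPair 'R' '7' cs = true := by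
  induction cs with
  | nil => simp [pvScanB, pvPair]
  | cons c cs ih =>
    cases cs with
    | nil => simp [pvScanB, pvPair]
    | cons d rest =>
      rw [pvScanB, pvPair, pvPair, pvPair, pvPair, pvPair, pvPair, pvPair, pvPair]
      by_cases hc : (c == 'R' && ['0', '1', '2', '3', '4', '5', '6', '7'].contains d) = true
      · simp only [hc, if_true, true_iff]
        simp only [Bool.and_eq_true, beq_iff_eq, List.contains_eq_mem, List.mem_cons,
          List.not_mem_nil, or_false, decide_eq_true_eq] at hc
        obtain ⟨hcR, hd⟩ := hc
        subst hcR
        rcases hd with h|h|h|h|h|h|h|h <;> subst h <;> simp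
      · rw [if_neg hc, ih]
        simp only [Bool.and_eq_true, beq_iff_eq, List.contains_eq_mem, List.mem_cons,
          List.not_mem_nil, or_false, decide_eq_true_eq, not_and, not_or] at hc
        constructor
        · rintro (h|h|h|h|h|h|h|h) <;> simp [h]
        · rintro (h|h|h|h|h|h|h|h) <;>
            rw [Bool.or_eq_true, Bool.and_eq_true, beq_iff_eq, beq_iff_eq] at h <;>
            rcases h with ⟨hR, hd⟩ | h
          all_goals first
            | exact absurd hd (by have := hc hR; tauto)
            | simp [h]
theorem IsRegister_spec : Claim_equal_IsRegister := by
  intro name _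
  unfold Spec_IsRegister IsRegister IsRegister_alt
  rw [Bool.eq_iff_iff]
  simp only [pvLoopA, Bool.if_true_left, Bool.or_eq_true, pvScanB_iff,
    PySem.Str.isIn_iff_infix]
  have h0 : ("R0" : String).toList = ['R', '0'] := rfl
  have h1 : ("R1" : String).toList = ['R', '1'] := rfl
  have h2 : ("R2" : String).toList = ['R', '2'] := rfl
  have h3 : ("R3" : String).toList = ['R', '3'] := rfl
  have h4 : ("R4" : String).toList = ['R', '4'] := rfl
  have h5 : ("R5" : String).toList = ['R', '5'] := rfl
  have h6 : ("R6" : String).toList = ['R', '6'] := rfl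
  have h7 : ("R7" : String).toList = ['R', '7'] := rfl
  rw [h0, h1, h2, h3, h4, h5, h6, h7]
  simp only [pvPair_iff_infix]
  simp
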